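-- pv_equiv track=rewrite | github.com/WorldVistA/docker-vista | FOIA-RPMS/Scripts/UpdateFromIHS.py | _assemble_routine
-- ===== SOURCE A (Python) =====
-- def _assemble_routine(name, line_dict):
--     """Assemble routine content from line number dict."""
--     if not line_dict:
--         return ''
--     max_line = max(line_dict.keys())
--     lines = []
--     for i in range(1, max_line + 1):
--         lines.append(line_dict.get(i, ''))
--     return '\n'.join(lines)
-- ===== SOURCE B (Python) =====
-- def _assemble_routine(name, line_dict):
--     """Assemble routine content by walking the keys in sorted order, filling gaps."""
--     lines = []
--     prev = 0
--     for k, v in sorted(line_dict.items(), key=lambda kv: kv[0]):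
--         if k < 1:
--             continue
--         lines.extend([''] * (k - prev - 1))
--         lines.append(v)
--         prev = k
--     return '\n'.join(lines)
-- ===== Notes on version B (the rewrite author's own statement) =====
-- stated objective: alternative
-- what changed: B sorts the dict items by line number and makes one gap-filling scan (extending with [''] * (k - prev - 1) between consecutive keys, skipping keys < 1), instead of iterating every index 1..max(keys) and doing a dict.get per index; it needs no max() computation and no empty-dict early return.
import Mathlib
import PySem

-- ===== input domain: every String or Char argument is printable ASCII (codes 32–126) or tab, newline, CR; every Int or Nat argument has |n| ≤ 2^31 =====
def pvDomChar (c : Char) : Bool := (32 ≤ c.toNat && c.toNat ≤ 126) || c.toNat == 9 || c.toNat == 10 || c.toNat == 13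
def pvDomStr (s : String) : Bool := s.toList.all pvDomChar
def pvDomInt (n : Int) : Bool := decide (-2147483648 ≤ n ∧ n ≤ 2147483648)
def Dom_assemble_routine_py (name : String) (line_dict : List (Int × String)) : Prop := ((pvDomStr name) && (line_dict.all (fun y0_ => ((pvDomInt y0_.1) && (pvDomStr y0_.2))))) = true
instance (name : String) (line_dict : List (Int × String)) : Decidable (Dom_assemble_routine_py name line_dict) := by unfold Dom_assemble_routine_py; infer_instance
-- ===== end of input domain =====

-- B sorts the dict items by line number and gap-fills in one scan, instead of gathering each index 1..max via dict.get; alternative decomposition, similar cost.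


-- ===== PORT A =====
-- gather: for i in range(1, max_line + 1): lines.append(line_dict.get(i, ''))
def assemble_routine_py (name : String) (line_dict : List (Int × String)) : String :=
  let d := PySem.Dict.ofList line_dict
  match PySem.List.max? d.keys (fun x => x) with
  | none => ""            -- 'if not line_dict: return ""'
  | some max_line =>
      let lines := (PySem.List.pyRange 1 (max_line + 1)).foldl
        (fun acc i => acc ++ [PySem.Dict.getD d i ""]) []
      PySem.Str.join "\n" lines

-- ===== PORT B =====
-- sorted scan: for k, v in sorted(items, key=kv[0]): if k < 1: continue; extend gap; append v; prev = k
def assemble_routine_py_alt (name : String) (line_dict : List (Int × String)) : String :=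
  let d := PySem.Dict.ofList line_dict
  let st := (PySem.List.sorted d.items (fun kv => kv.1)).foldl
      (fun (st : List String × Int) kv =>
        if kv.1 < 1 then st
        else (st.1 ++ List.replicate (kv.1 - st.2 - 1).toNat "" ++ [kv.2], kv.1))
      ([], 0)
  PySem.Str.join "\n" st.1

-- ===== PRECONDITION & SPEC =====
def Spec_assemble_routine_py (name : String) (line_dict : List (Int × String)) (out : String) : Prop := out = assemble_routine_py_alt name line_dict
instance (name : String) (line_dict : List (Int × String)) (out : String) : Decidable (Spec_assemble_routine_py name line_dict out) := by unfold Spec_assemble_routine_py; infer_instance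

-- ===== CLAIM (what is proved, stated in full; the proofs are below) =====
def Claim_equal_assemble_routine_py : Prop := ∀ (name : String) (line_dict : List (Int × String)), Dom_assemble_routine_py name line_dict → Spec_assemble_routine_py name line_dict (assemble_routine_py name line_dict)

-- ===== LEMMAS AND PROOFS =====

-- the gap-filling scan over a sorted list of present (key, value) pairs produces exactly
-- the per-index gather 'getD d i ""' over the range (p, m]
theorem scan_spec (d : PySem.Dict Int String) (ps : List (Int × String))
    (acc : List String) (p m : Int)
    (hsorted : ps.Pairwise (fun a b => a.1 < b.1))
    (hgt : ∀ kv ∈ ps, p < kv.1)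
    (hval : ∀ kv ∈ ps, PySem.Dict.getD d kv.1 "" = kv.2)
    (hcov : ∀ i : Int, p < i → i ≤ m → (∀ kv ∈ ps, kv.1 ≠ i) → PySem.Dict.getD d i "" = "")
    (hle : ∀ kv ∈ ps, kv.1 ≤ m)
    (hnil : ps = [] → m ≤ p)
    (hex : ps ≠ [] → ∃ kv ∈ ps, kv.1 = m) :
    (ps.foldl (fun (st : List String × Int) kv =>
        (st.1 ++ List.replicate (kv.1 - st.2 - 1).toNat "" ++ [kv.2], kv.1)) (acc, p)).1
      = acc ++ (PySem.List.pyRange (p + 1) (m + 1)).map (fun i => PySem.Dict.getD d i "") := by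
  induction ps generalizing acc p with
  | nil =>
      have hmp : m ≤ p := hnil rfl
      have hr : PySem.List.pyRange (p + 1) (m + 1) = [] := by
        apply List.eq_nil_of_length_eq_zero
        rw [PySem.List.length_pyRange_one]; omega
      simp [hr]
  | cons kv t ih =>
      obtain ⟨k, v⟩ := kv
      have hpk : p < k := hgt (k, v) (List.mem_cons_self ..)
      have hkm : k ≤ m := hle (k, v) (List.mem_cons_self ..)
      have htgt : ∀ q ∈ t, k < q.1 := by
        intro q hq; exact List.rel_of_pairwise_cons hsorted hq
      have hex' : t ≠ [] → ∃ q ∈ t, q.1 = m := by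
        intro hne
        obtain ⟨w, hw, hwm⟩ := hex (by simp)
        rcases List.mem_cons.mp hw with h | h
        · exfalso
          obtain ⟨q, hq⟩ := List.exists_mem_of_ne_nil t hne
          have h1 := htgt q hq
          have h2 := hle q (List.mem_cons_of_mem _ hq)
          have : k = m := by rw [← hwm, h]
          omega
        · exact ⟨w, h, hwm⟩
      have hnil' : t = [] → m ≤ k := by
        intro hte
        obtain ⟨w, hw, hwm⟩ := hex (by simp)
        rcases List.mem_cons.mp hw with h | h
        · have : k = m := by rw [← hwm, h]
          omega
        · rw [hte] at h; exact absurd h (List.not_mem_nil)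
      simp only [List.foldl_cons]
      rw [ih (acc ++ List.replicate (k - p - 1).toNat "" ++ [v]) k
            (hsorted.of_cons)
            htgt
            (fun q hq => hval q (List.mem_cons_of_mem _ hq))
            (fun i hi1 hi2 hni => hcov i (by omega) hi2 (by
              intro q hq
              rcases List.mem_cons.mp hq with h | h
              · rw [h]; omega
              · exact hni q h))
            (fun q hq => hle q (List.mem_cons_of_mem _ hq))
            hnil' hex']
      -- split the range (p, m] into (p, k) ++ [k] ++ (k, m]
      rw [PySem.List.pyRange_one_append (p + 1) (k + 1) (m + 1) (by omega) (by omega)]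
      rw [show PySem.List.pyRange (p + 1) (k + 1) = PySem.List.pyRange (p + 1) k ++ [k] from
            PySem.List.pyRange_one_succ_right (by omega)]
      have hgap : (PySem.List.pyRange (p + 1) k).map (fun i => PySem.Dict.getD d i "") =
          List.replicate (k - p - 1).toNat "" := by
        have h1 : ∀ i ∈ PySem.List.pyRange (p + 1) k, PySem.Dict.getD d i "" = "" := by
          intro i hi
          have hb := PySem.List.mem_pyRange_one.mp hi
          refine hcov i (by omega) (by omega) ?_
          intro q hq
          rcases List.mem_cons.mp hq with h | h
          · rw [h]; omega
          · have := htgt q h; omega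
        rw [List.map_congr_left h1, List.map_const', PySem.List.length_pyRange_one]
        congr 1
        omega
      have hk : PySem.Dict.getD d k "" = v := hval (k, v) (List.mem_cons_self ..)
      simp only [List.map_append, List.map_cons, List.map_nil, hgap, hk]
      simp [List.append_assoc]

-- ===== VERDICT (by name: the statement is the Claim_ definition above) =====
theorem assemble_routine_py_spec : Claim_equal_assemble_routine_py := by
  intro name line_dict _
  show assemble_routine_py name line_dict = assemble_routine_py_alt name line_dict
  set d := PySem.Dict.ofList line_dict with hd
  have hnd : d.keys.Nodup := PySem.Dict.nodup_keys_ofList line_dict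
  have hkeys : d.keys = d.items.map Prod.fst := rfl
  -- rewrite B's guarded loop as a fold over the filtered sorted list
  have hbody : (fun (st : List String × Int) (kv : Int × String) =>
        if kv.1 < 1 then st
        else (st.1 ++ List.replicate (kv.1 - st.2 - 1).toNat "" ++ [kv.2], kv.1))
      = (fun (st : List String × Int) (kv : Int × String) =>
        if 1 ≤ kv.1 then (st.1 ++ List.replicate (kv.1 - st.2 - 1).toNat "" ++ [kv.2], kv.1) else st) := by
    funext st kv
    rcases lt_or_ge kv.1 1 with h | h
    · rw [if_pos h, if_neg (by omega)]
    · rw [if_neg (by omega), if_pos h]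
  set s := PySem.List.sorted d.items (fun kv => kv.1) with hs
  set ps := s.filter (fun kv => decide (1 ≤ kv.1)) with hps
  have hperm : s.Perm d.items := PySem.List.sorted_perm d.items (fun kv => kv.1) false
  have hmem_items : ∀ q ∈ ps, q ∈ d.items := by
    intro q hq
    exact hperm.subset (List.mem_of_mem_filter hq)
  have hndk_s : (s.map Prod.fst).Nodup := by
    refine (List.Perm.map Prod.fst hperm).nodup_iff.mpr ?_
    rw [← hkeys]; exact hnd
  have hpair : s.Pairwise (fun a b => a.1 < b.1) := by
    have h1 : s.Pairwise (fun a b => a.1 ≤ b.1) := PySem.List.sorted_pairwise d.items (fun kv => kv.1)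
    have h2 : s.Pairwise (fun a b => a.1 ≠ b.1) := (List.pairwise_map).mp hndk_s
    exact (h1.and h2).imp (fun h => lt_of_le_of_ne h.1 h.2)
  have hpair_ps : ps.Pairwise (fun a b => a.1 < b.1) := hpair.filter _
  have hval : ∀ q ∈ ps, PySem.Dict.getD d q.1 "" = q.2 := by
    intro q hq
    exact PySem.Dict.getD_of_mem_items d (hmem_items q hq) hnd ""
  have hcov : ∀ i : Int, 0 < i → (∀ q ∈ ps, q.1 ≠ i) → PySem.Dict.getD d i "" = "" := by
    intro i hi hni
    cases hc : d.contains i with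
    | false => exact PySem.Dict.getD_of_not_contains d "" hc
    | true =>
        exfalso
        have : i ∈ d.keys := (PySem.Dict.contains_iff_mem_keys d i).mp hc
        rw [hkeys] at this
        obtain ⟨q, hq, hqi⟩ := List.mem_map.mp this
        have hqs : q ∈ s := hperm.mem_iff.mpr hq
        have hqps : q ∈ ps := by
          rw [hps]
          refine List.mem_filter.mpr ⟨hqs, by simp [hqi]; omega⟩
        exact hni q hqps hqi
  have hgt : ∀ q ∈ ps, (0 : Int) < q.1 := by
    intro q hq
    have := (List.mem_filter.mp hq).2
    simp at this; omega
  cases hmax : PySem.List.max? d.keys (fun x => x) with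
  | none =>
      have hknil : d.keys = [] := (PySem.List.max?_eq_none_iff d.keys _).mp hmax
      have hinil : d.items = [] := by
        rw [hkeys] at hknil
        exact List.map_eq_nil_iff.mp hknil
      have hsnil : s = [] := by
        rw [hs]
        exact (PySem.List.sorted_eq_nil_iff d.items _ false).mpr hinil
      simp only [assemble_routine_py, assemble_routine_py_alt, ← hd, hmax]
      rw [← hs, hsnil]
      rfl
  | some m =>
      have hle : ∀ q ∈ ps, q.1 ≤ m := by
        intro q hq
        have : q.1 ∈ d.keys := by
          rw [hkeys]; exact List.mem_map_of_mem (hmem_items q hq)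
        exact PySem.List.max?_isMax hmax q.1 this
      simp only [assemble_routine_py, assemble_routine_py_alt, ← hd, hmax]
      rw [PySem.List.foldl_append_singleton_eq_map, hbody, ← hs,
          PySem.List.foldl_ite_eq_foldl_filter (fun kv : Int × String => 1 ≤ kv.1)
            (fun (st : List String × Int) kv =>
              (st.1 ++ List.replicate (kv.1 - st.2 - 1).toNat "" ++ [kv.2], kv.1)),
          ← hps]
      rcases lt_or_ge m 1 with hm | hm
      · -- max key < 1: both sides assemble the empty line list
        have hpnil : ps = [] := by
          rw [List.eq_nil_iff_forall_not_mem]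
          intro q hq
          have := hgt q hq
          have := hle q hq
          omega
        have hr : PySem.List.pyRange 1 (m + 1) = [] := by
          apply List.eq_nil_of_length_eq_zero
          rw [PySem.List.length_pyRange_one]; omega
        rw [hpnil, hr]
        rfl
      · -- max key ≥ 1: the scan reproduces the gather over range 1..m
        have hmmem : m ∈ d.keys := PySem.List.max?_mem hmax
        have hps_ne : ps ≠ [] := by
          rw [hkeys] at hmmem
          obtain ⟨q, hq, hqm⟩ := List.mem_map.mp hmmem
          have hqs : q ∈ s := hperm.mem_iff.mpr hq
          have : q ∈ ps := by
            rw [hps]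
            refine List.mem_filter.mpr ⟨hqs, by simp [hqm]; omega⟩
          intro h; rw [h] at this; exact List.not_mem_nil this
        have hex : ps ≠ [] → ∃ q ∈ ps, q.1 = m := by
          intro _
          rw [hkeys] at hmmem
          obtain ⟨q, hq, hqm⟩ := List.mem_map.mp hmmem
          have hqs : q ∈ s := hperm.mem_iff.mpr hq
          exact ⟨q, List.mem_filter.mpr ⟨hqs, by simp [hqm]; omega⟩, hqm⟩
        rw [scan_spec d ps [] 0 m hpair_ps hgt hval
              (fun i hi1 _ hni => hcov i hi1 hni) hle
              (fun h => absurd h hps_ne) hex]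
        norm_num
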